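-- pv_equiv track=rewrite | github.com/villarrealjavier/ProgracionEjercicios | Ejercicio6worksheet.py | ecuentrapalabra
-- ===== SOURCE A (Python) =====
-- def ecuentrapalabra(cadena,palabra):
--     resultado=False
--     sitio=0
--     palabragood=""
--     cadena+=" "
--     for i in cadena:
--         if palabragood==palabra:
--             resultado=True
--         elif palabra[sitio]==i:
--             palabragood+=i
--             sitio+=1
--
--
--
--     return resultado
-- ===== SOURCE B (Python) =====
-- def ecuentrapalabra(cadena, palabra):
--     it = iter(cadena)
--     return all(c in it for c in palabra)
-- ===== Notes on version B (the rewrite author's own statement) =====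
-- stated objective: idiomatic
-- what changed: Replaced A's explicit index-and-accumulator scan over cadena+' ' (with the trailing-space trick delaying detection by one iteration) by the canonical shared-iterator subsequence idiom that loops over palabra and consumes one iterator over cadena via C-level membership tests.
import Mathlib
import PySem

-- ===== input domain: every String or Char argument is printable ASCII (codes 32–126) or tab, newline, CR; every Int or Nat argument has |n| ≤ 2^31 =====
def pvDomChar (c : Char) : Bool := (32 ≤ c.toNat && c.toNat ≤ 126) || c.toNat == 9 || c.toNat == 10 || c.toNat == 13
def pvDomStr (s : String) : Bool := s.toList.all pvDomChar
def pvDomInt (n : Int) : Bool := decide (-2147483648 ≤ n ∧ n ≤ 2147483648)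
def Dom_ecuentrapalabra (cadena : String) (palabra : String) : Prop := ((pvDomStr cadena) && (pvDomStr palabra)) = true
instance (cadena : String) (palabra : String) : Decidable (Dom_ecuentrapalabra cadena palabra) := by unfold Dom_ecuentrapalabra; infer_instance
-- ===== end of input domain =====

-- B replaces A's indexed accumulator loop over cadena+" " with the canonical
-- shared-iterator subsequence idiom looping over palabra; same boolean on all inputs.

-- ===== PORT A =====
-- the for-loop of A: state (resultado, sitio, palabragood); branches in A's order.
-- palabra[sitio] is PySem.Str.pyGet?; the 'none' (IndexError) case is unreachable
-- because sitio can reach palabra's length only when palabragood == palabra,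
-- which the first branch catches; the state is kept unchanged there.
def ecuentrapalabraLoop (palabra : String) : List Char → Bool → Int → String → Bool
  | [], resultado, _, _ => resultado
  | i :: rest, resultado, sitio, palabragood =>
    if palabragood == palabra then
      ecuentrapalabraLoop palabra rest true sitio palabragood
    else
      match PySem.Str.pyGet? palabra sitio with
      | some ch =>
        if ch == i then
          ecuentrapalabraLoop palabra rest resultado (sitio + 1) (palabragood.push i)
        else
          ecuentrapalabraLoop palabra rest resultado sitio palabragood
      | none => ecuentrapalabraLoop palabra rest resultado sitio palabragood

def ecuentrapalabra (cadena : String) (palabra : String) : Bool :=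
  -- cadena += " "; then iterate over its characters
  ecuentrapalabraLoop palabra (cadena ++ " ").toList false 0 ""

-- ===== PORT B =====
-- Source B: it = iter(cadena); all(c in it for c in palabra) — for each pattern char,
-- consume the iterator until that char is found.
def ecuentrapalabraSub : List Char → List Char → Bool
  | [], _ => true
  | _ :: _, [] => false
  | p :: ps, c :: cs =>
    if p == c then ecuentrapalabraSub ps cs else ecuentrapalabraSub (p :: ps) cs

def ecuentrapalabra_alt (cadena : String) (palabra : String) : Bool :=
  ecuentrapalabraSub palabra.toList cadena.toList

-- ===== PRECONDITION & SPEC =====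
def Spec_ecuentrapalabra (cadena : String) (palabra : String) (out : Bool) : Prop := out = ecuentrapalabra_alt cadena palabra
instance (cadena : String) (palabra : String) (out : Bool) : Decidable (Spec_ecuentrapalabra cadena palabra out) := by unfold Spec_ecuentrapalabra; infer_instance

-- ===== CLAIM (what is proved, stated in full; the proofs are below) =====
def Claim_equal_ecuentrapalabra : Prop := ∀ (cadena : String) (palabra : String), Dom_ecuentrapalabra cadena palabra → Spec_ecuentrapalabra cadena palabra (ecuentrapalabra cadena palabra)

-- ===== LEMMAS AND PROOFS =====

-- "greedy match that must complete strictly before the iteration ends":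
-- A's loop with resultado = false, sitio = k and palabragood = take k of palabra
-- computes exactly this function on the remaining pattern.
def ecuGm : List Char → List Char → Bool
  | [], cs => decide (cs ≠ [])
  | _ :: _, [] => false
  | p :: ps, c :: cs => if p == c then ecuGm ps cs else ecuGm (p :: ps) cs

-- once resultado is true, the loop returns true
theorem ecuLoop_true (palabra : String) (cs : List Char) (sitio : Int) (g : String) :
    ecuentrapalabraLoop palabra cs true sitio g = true := by
  induction cs generalizing sitio g with
  | nil => rfl
  | cons c cs ih =>
    unfold ecuentrapalabraLoop
    split
    · exact ih _ _
    · cases h : PySem.Str.pyGet? palabra sitio with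
      | none => exact ih _ _
      | some ch => dsimp only; split <;> exact ih _ _

theorem ecuLoop_inv (P : List Char) (cs : List Char) (k : Nat) (hk : k ≤ P.length) :
    ecuentrapalabraLoop (String.ofList P) cs false (k : Int) (String.ofList (P.take k)) =
      ecuGm (P.drop k) cs := by
  induction cs generalizing k with
  | nil =>
    cases h : P.drop k with
    | nil => rfl
    | cons p ps => rfl
  | cons c cs ih =>
    unfold ecuentrapalabraLoop
    have hmk : (String.ofList (P.take k) == String.ofList P) = decide (P.take k = P) := by
      by_cases h : P.take k = P <;> simp [h, String.ofList_inj]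
    by_cases hfull : k = P.length
    · subst hfull
      have h1 : P.take P.length = P := List.take_length
      have h2 : P.drop P.length = [] := List.drop_length
      rw [hmk, h1, h2]
      simp [ecuLoop_true, ecuGm]
    · have hlt : k < P.length := lt_of_le_of_ne hk hfull
      have hne : P.take k ≠ P := by
        intro h; have := congrArg List.length h
        simp [Nat.min_eq_left hk] at this; omega
      rw [hmk]
      simp only [decide_eq_true_eq, if_neg hne]
      have hget : PySem.Str.pyGet? (String.ofList P) (k : Int) = some P[k] := by
        simp [List.getElem?_eq_getElem hlt]
      rw [hget]
      have hdrop : P.drop k = P[k] :: P.drop (k + 1) := List.drop_eq_getElem_cons hlt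
      dsimp only
      by_cases hc : P[k] = c
      · rw [if_pos (by simp [hc])]
        have hpush : (String.ofList (P.take k)).push c = String.ofList (P.take (k + 1)) := by
          apply String.toList_inj.mp
          simp [List.take_add_one, List.getElem?_eq_getElem hlt, hc]
        have : ((k : Int) + 1) = ((k + 1 : Nat) : Int) := by push_cast; ring
        rw [hpush, this, ih (k + 1) hlt, hdrop]
        simp [ecuGm, hc]
      · rw [if_neg (by simp [hc])]
        rw [ih k hk, hdrop]
        simp [ecuGm, hc]

-- the appended trailing character turns the strict greedy match into plain
-- subsequence matching over the original cadena
theorem ecuGm_append_single (ps cs : List Char) (x : Char) :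
    ecuGm ps (cs ++ [x]) = ecuentrapalabraSub ps cs := by
  induction cs generalizing ps with
  | nil =>
    cases ps with
    | nil => simp [ecuGm, ecuentrapalabraSub]
    | cons p ps' =>
      simp only [List.nil_append]
      unfold ecuGm
      split <;> cases ps' <;> simp [ecuGm, ecuentrapalabraSub]
  | cons c cs ih =>
    cases ps with
    | nil => simp [ecuGm, ecuentrapalabraSub]
    | cons p ps' =>
      simp only [List.cons_append]
      unfold ecuGm ecuentrapalabraSub
      split <;> [exact ih ps'; exact ih (p :: ps')]

-- ===== VERDICT (by name: the statement is the Claim_ definition above) =====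
theorem ecuentrapalabra_spec : Claim_equal_ecuentrapalabra := by
  intro cadena palabra _
  show ecuentrapalabra cadena palabra = ecuentrapalabra_alt cadena palabra
  unfold ecuentrapalabra ecuentrapalabra_alt
  have hpal : palabra = String.ofList palabra.toList := String.ofList_toList.symm
  have hcad : (cadena ++ " ").toList = cadena.toList ++ [' '] := by
    simp [String.toList_append]
  rw [hcad]
  conv_lhs => rw [hpal]
  have h0 : ("" : String) = String.ofList (palabra.toList.take 0) := by
    apply String.toList_inj.mp; simp
  rw [h0]
  have := ecuLoop_inv palabra.toList (cadena.toList ++ [' ']) 0 (Nat.zero_le _)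
  simpa using (this.trans (by rw [List.drop_zero]; exact ecuGm_append_single _ _ _))
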